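-- pv_equiv track=rewrite | github.com/Shubham-Choudhury/GeeksforGeeks-Problems | 2023 December/Inorder Traversal and BST/main.py | isRepresentingBST
-- ===== SOURCE A (Python) =====
-- def isRepresentingBST(arr, N):
--     # code here
--     stack = []
--     prev_val = float("-inf")
--
--     for val in arr:
--         if val <= prev_val:
--             return 0
--
--         while stack and stack[-1] < val:
--             prev_val = stack.pop()
--
--         stack.append(val)
--
--     return 1
-- ===== SOURCE B (Python) =====
-- def isRepresentingBST(arr, N):
--     # Phase 1: nge[i] = index of the first later element strictly greater than arr[i] (n if none).
--     n = len(arr)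
--     nge = [n] * n
--     stack = []
--     for j in range(n):
--         while stack and arr[stack[-1]] < arr[j]:
--             nge[stack.pop()] = j
--         stack.append(j)
--     # Phase 2: suf[k] = min(arr[k:]).
--     suf = [0] * n
--     m = None
--     for k in range(n - 1, -1, -1):
--         m = arr[k] if m is None else min(m, arr[k])
--         suf[k] = m
--     # Phase 3: once a strictly greater element appears after i, every later
--     # element must exceed arr[i].
--     for i in range(n):
--         j = nge[i]
--         if j + 1 < n and suf[j + 1] <= arr[i]:
--             return 0
--     return 1
-- ===== Notes on version B (the rewrite author's own statement) =====
-- stated objective: alternative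
-- what changed: A's single streaming pass (monotonic value stack with a running lower bound and early return) is replaced by three independent linear passes: a next-strictly-greater-index table, a suffix-minimum array, and a per-index check that once a greater element appears after arr[i], every later element exceeds arr[i].
import Mathlib
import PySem

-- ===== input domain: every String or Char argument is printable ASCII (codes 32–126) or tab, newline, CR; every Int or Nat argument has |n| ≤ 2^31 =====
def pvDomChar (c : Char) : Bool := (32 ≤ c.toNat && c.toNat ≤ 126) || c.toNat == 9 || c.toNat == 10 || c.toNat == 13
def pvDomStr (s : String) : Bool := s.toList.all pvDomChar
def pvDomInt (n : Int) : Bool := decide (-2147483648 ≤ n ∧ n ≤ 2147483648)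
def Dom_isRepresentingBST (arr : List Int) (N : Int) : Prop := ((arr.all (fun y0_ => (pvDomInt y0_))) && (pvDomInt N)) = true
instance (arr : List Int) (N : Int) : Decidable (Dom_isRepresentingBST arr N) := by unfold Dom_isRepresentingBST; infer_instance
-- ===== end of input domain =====

-- B replaces A's single streaming pass (monotonic value stack + running lower bound)
-- by three independent linear passes: next-strictly-greater indices, suffix minima,
-- and a per-index check; same O(n) cost, genuinely different decomposition ("alternative").

-- ===== PORT A =====
-- `while stack and stack[-1] < val: prev_val = stack.pop()` — stack stored head = top;
-- prev_val : Option Int, none = float("-inf") (val <= -inf is false for every int).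
def pvPopA : List Int → Option Int → Int → List Int × Option Int
  | [], prev, _ => ([], prev)
  | t :: rest, prev, v => if t < v then pvPopA rest (some t) v else (t :: rest, prev)

def pvPrevLe (v : Int) (prev : Option Int) : Bool :=
  match prev with
  | none => false
  | some p => decide (v ≤ p)

def pvGoA : List Int → List Int → Option Int → Int
  | [], _, _ => 1
  | v :: vs, stack, prev =>
    if pvPrevLe v prev then 0
    else
      let sp := pvPopA stack prev v
      pvGoA vs (v :: sp.1) sp.2

def isRepresentingBST (arr : List Int) (N : Int) : Int := pvGoA arr [] none

-- ===== PORT B =====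
-- phase 1 inner while loop: `while stack and arr[stack[-1]] < arr[j]: nge[stack.pop()] = j`
-- (index stack, head = top; indices are always in range, so `getD _ 0` is exact)
def pvPopB (arr : List Int) (j : Nat) : List Nat → List Nat → List Nat × List Nat
  | [], nge => ([], nge)
  | i :: rest, nge =>
    if arr.getD i 0 < arr.getD j 0 then pvPopB arr j rest (nge.set i j)
    else (i :: rest, nge)

-- phase 1 outer loop: `for j in range(n)`
def pvNgeLoop (arr : List Int) : List Nat → List Nat → List Nat → List Nat
  | [], _, nge => nge
  | j :: js, stack, nge =>
    let sn := pvPopB arr j stack nge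
    pvNgeLoop arr js (j :: sn.1) sn.2

-- phase 2: suffix minima built right-to-left (the `for k in range(n-1,-1,-1)` loop)
def pvSuf : List Int → List Int
  | [] => []
  | v :: rest =>
    match pvSuf rest with
    | [] => [v]
    | m :: ms => min v m :: m :: ms

-- phase 3: `for i in range(n)` with the early `return 0`
def pvCheck (arr : List Int) (suf : List Int) (nge : List Nat) : List Nat → Int
  | [] => 1
  | i :: is =>
    let j := nge.getD i 0
    if decide (j + 1 < arr.length) && decide (suf.getD (j + 1) 0 ≤ arr.getD i 0) then 0
    else pvCheck arr suf nge is

def isRepresentingBST_alt (arr : List Int) (N : Int) : Int :=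
  let n := arr.length
  let nge := pvNgeLoop arr (List.range n) [] (List.replicate n n)
  pvCheck arr (pvSuf arr) nge (List.range n)

-- ===== PRECONDITION & SPEC =====
def Spec_isRepresentingBST (arr : List Int) (N : Int) (out : Int) : Prop := out = isRepresentingBST_alt arr N
instance (arr : List Int) (N : Int) (out : Int) : Decidable (Spec_isRepresentingBST arr N out) := by unfold Spec_isRepresentingBST; infer_instance

-- ===== CLAIM (what is proved, stated in full; the proofs are below) =====
def Claim_equal_isRepresentingBST : Prop := ∀ (arr : List Int) (N : Int), Dom_isRepresentingBST arr N → Spec_isRepresentingBST arr N (isRepresentingBST arr N)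

-- ===== LEMMAS AND PROOFS =====

-- `pvF arr i` = index of the first j > i with arr[j] > arr[i], or arr.length if none.
def pvFgo (arr : List Int) (x : Int) (j : Nat) : Nat :=
  if h : j < arr.length then
    (if x < arr.getD j 0 then j else pvFgo arr x (j + 1))
  else arr.length
termination_by arr.length - j

def pvF (arr : List Int) (i : Nat) : Nat := pvFgo arr (arr.getD i 0) (i + 1)

lemma pvFgo_le (arr : List Int) (x : Int) (j : Nat) : pvFgo arr x j ≤ arr.length := by
  unfold pvFgo
  split
  · split
    · omega
    · exact pvFgo_le arr x (j + 1)
  · exact le_refl _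
termination_by arr.length - j

lemma pvFgo_lt_imp (arr : List Int) (x : Int) (j : Nat) (h : pvFgo arr x j < arr.length) :
    j ≤ pvFgo arr x j ∧ x < arr.getD (pvFgo arr x j) 0 := by
  rw [pvFgo] at h ⊢
  split at h <;> rename_i hj
  · split at h <;> rename_i hx
    · simp only [dif_pos hj, if_pos hx]
      exact ⟨Nat.le_refl j, hx⟩
    · have := pvFgo_lt_imp arr x (j + 1) h
      simp only [dif_pos hj, if_neg hx]
      exact ⟨by omega, this.2⟩
  · exact absurd h (lt_irrefl _)
termination_by arr.length - j

lemma pvFgo_before (arr : List Int) (x : Int) (j k : Nat) (h1 : j ≤ k)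
    (h2 : k < pvFgo arr x j) : ¬ x < arr.getD k 0 := by
  rw [pvFgo] at h2
  split at h2
  · split at h2
    · omega
    · rename_i hj hx
      rcases Nat.eq_or_lt_of_le h1 with rfl | hlt
      · exact hx
      · exact pvFgo_before arr x (j + 1) k hlt h2
  · rename_i hj
    have hk : k < arr.length := lt_of_lt_of_le h2 (le_refl _)
    omega
termination_by arr.length - j

lemma pvFgo_found (arr : List Int) (x : Int) (j k : Nat) (h1 : j ≤ k) (h2 : k < arr.length)
    (h3 : x < arr.getD k 0) : pvFgo arr x j ≤ k := by
  rw [pvFgo]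
  split
  · split
    · omega
    · rename_i hj hx
      rcases Nat.eq_or_lt_of_le h1 with rfl | hlt
      · exact absurd h3 hx
      · exact pvFgo_found arr x (j + 1) k hlt h2 h3
  · omega
termination_by arr.length - j

lemma pvF_le (arr : List Int) (i : Nat) : pvF arr i ≤ arr.length := pvFgo_le _ _ _

lemma pvF_gt (arr : List Int) (i : Nat) (h : i < arr.length) : i < pvF arr i := by
  rcases lt_or_ge (pvF arr i) arr.length with hl | hl
  · rw [pvF] at hl ⊢
    have := (pvFgo_lt_imp arr (arr.getD i 0) (i + 1) hl).1
    omega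
  · omega

lemma pvF_hit (arr : List Int) (i : Nat) (h : pvF arr i < arr.length) :
    arr.getD i 0 < arr.getD (pvF arr i) 0 := (pvFgo_lt_imp arr _ _ h).2

lemma pvF_before (arr : List Int) (i k : Nat) (h1 : i < k) (h2 : k < pvF arr i) :
    arr.getD k 0 ≤ arr.getD i 0 := by
  exact not_lt.mp (pvFgo_before arr (arr.getD i 0) (i + 1) k h1 h2)

lemma pvF_found (arr : List Int) (i k : Nat) (h1 : i < k) (h2 : k < arr.length)
    (h3 : arr.getD i 0 < arr.getD k 0) : pvF arr i ≤ k :=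
  pvFgo_found arr _ (i + 1) k h1 h2 h3

lemma pvF_big (arr : List Int) (i : Nat) (h : arr.length ≤ i) : pvF arr i = arr.length := by
  rw [pvF, pvFgo]
  split
  · omega
  · rfl

-- A run of A returns 1 exactly when no element is ≤ an element whose first-greater
-- index lies strictly before it.
def pvOk (arr : List Int) : Prop :=
  ∀ i k, pvF arr i < k → k < arr.length → arr.getD i 0 < arr.getD k 0

-- ---- shared stack characterisation ----

def pvStk (arr : List Int) (t : Nat) : List Nat :=
  ((List.range t).filter (fun i => decide (t ≤ pvF arr i))).reverse

lemma pvStk_mem (arr : List Int) (t i : Nat) :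
    i ∈ pvStk arr t ↔ i < t ∧ t ≤ pvF arr i := by
  simp [pvStk, List.mem_filter, List.mem_range]

lemma pvStk_sorted (arr : List Int) (t : Nat) : List.Pairwise (· > ·) (pvStk arr t) := by
  rw [pvStk, List.pairwise_reverse]
  exact List.Pairwise.filter _ List.pairwise_lt_range

lemma pvStk_zero (arr : List Int) : pvStk arr 0 = [] := by simp [pvStk]

lemma pvStk_succ (arr : List Int) (t : Nat) (ht : t < arr.length) :
    pvStk arr (t + 1) = t :: (pvStk arr t).filter (fun i => decide (t + 1 ≤ pvF arr i)) := by
  have hft : decide (t + 1 ≤ pvF arr t) = true := by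
    simp only [decide_eq_true_eq]
    exact pvF_gt arr t ht
  rw [pvStk, pvStk, List.range_succ, List.filter_append, List.filter_reverse,
    List.filter_filter, List.reverse_append]
  simp only [List.filter_cons, List.filter_nil, hft, if_pos, List.reverse_cons,
    List.reverse_nil, List.nil_append, List.cons_append]
  congr 1
  apply congrArg
  apply List.filter_congr
  intro i _
  by_cases h : t + 1 ≤ pvF arr i <;> simp [h] <;> omega

-- ---- B side: phase 1 computes pvF ----

lemma pvGetD_set_self (L : List Nat) (i v : Nat) (h : i < L.length) :
    (L.set i v).getD i 0 = v := by
  simp [List.getD_eq_getElem?_getD, h]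

lemma pvGetD_set_ne (L : List Nat) (i v m : Nat) (h : m ≠ i) :
    (L.set i v).getD m 0 = L.getD m 0 := by
  simp [List.getD_eq_getElem?_getD, Ne.symm h]

-- for i on the stack (i < t ≤ pvF i), "arr[i] < arr[t]" says exactly "pvF i = t"
lemma pvPop_val_iff (arr : List Int) (t i : Nat) (ht : t < arr.length)
    (h1 : i < t) (h2 : t ≤ pvF arr i) :
    arr.getD i 0 < arr.getD t 0 ↔ pvF arr i = t := by
  constructor
  · intro hv
    exact le_antisymm (pvF_found arr i t h1 ht hv) h2
  · intro he
    have := pvF_hit arr i (by omega)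
    rwa [he] at this

lemma popB_step (arr : List Int) (t : Nat) (ht : t < arr.length) :
    ∀ (l : List Nat) (nge : List Nat),
      (∀ i ∈ l, i < t ∧ t ≤ pvF arr i) → List.Pairwise (· > ·) l →
      (∀ i ∈ l, i < nge.length) →
      (pvPopB arr t l nge).1 = l.filter (fun i => decide (t + 1 ≤ pvF arr i)) ∧
      (pvPopB arr t l nge).2.length = nge.length ∧
      (∀ m, (pvPopB arr t l nge).2.getD m 0 =
        if m ∈ l ∧ pvF arr m = t then t else nge.getD m 0) := by
  intro l
  induction l with
  | nil => intro nge _ _ _; simp [pvPopB]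
  | cons i rest ih =>
    intro nge hmem hpw hlen
    have hi := hmem i (List.mem_cons_self)
    rw [List.pairwise_cons] at hpw
    by_cases hv : arr.getD i 0 < arr.getD t 0
    · have hfi : pvF arr i = t := (pvPop_val_iff arr t i ht hi.1 hi.2).mp hv
      have hrec := ih (nge.set i t) (fun m hm => hmem m (List.mem_cons_of_mem _ hm)) hpw.2
        (fun m hm => by rw [List.length_set]; exact hlen m (List.mem_cons_of_mem _ hm))
      simp only [pvPopB, if_pos hv]
      refine ⟨?_, ?_, ?_⟩
      · rw [hrec.1, List.filter_cons]
        have hd : decide (t + 1 ≤ pvF arr i) = false := by simp [hfi]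
        rw [hd]
        simp
      · rw [hrec.2.1, List.length_set]
      · intro m
        rw [hrec.2.2 m]
        by_cases hmr : m ∈ rest ∧ pvF arr m = t
        · rw [if_pos hmr, if_pos ⟨List.mem_cons_of_mem _ hmr.1, hmr.2⟩]
        · rw [if_neg hmr]
          by_cases hmi : m = i
          · subst hmi
            rw [if_pos ⟨List.mem_cons_self, hfi⟩]
            exact pvGetD_set_self nge m t (hlen m List.mem_cons_self)
          · rw [pvGetD_set_ne nge i t m hmi]
            rw [if_neg]
            rintro ⟨hm, hf⟩
            rcases List.mem_cons.mp hm with h | h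
            · exact hmi h
            · exact hmr ⟨h, hf⟩
    · have key : ∀ m ∈ i :: rest, t + 1 ≤ pvF arr m := by
        intro m hm
        rcases List.mem_cons.mp hm with rfl | hm'
        · rcases Nat.eq_or_lt_of_le hi.2 with he | hlt
          · exact absurd ((pvPop_val_iff arr t m ht hi.1 hi.2).mpr he.symm) hv
          · exact hlt
        · have hmp := hmem m (List.mem_cons_of_mem _ hm')
          have him : m < i := hpw.1 m hm'
          have h1 : arr.getD i 0 ≤ arr.getD m 0 :=
            pvF_before arr m i him (by omega)
          have h2 : ¬ arr.getD m 0 < arr.getD t 0 := by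
            intro hc
            exact hv (lt_of_le_of_lt h1 hc)
          rcases Nat.eq_or_lt_of_le hmp.2 with he | hlt
          · exact absurd ((pvPop_val_iff arr t m ht hmp.1 hmp.2).mpr he.symm) h2
          · exact hlt
      simp only [pvPopB, if_neg hv]
      refine ⟨?_, ?_, ?_⟩
      · rw [List.filter_eq_self.mpr (fun m hm => by simp [key m hm])]
      · trivial
      · intro m
        rw [if_neg]
        rintro ⟨hm, hf⟩
        have := key m hm
        omega

def pvNgeOk (arr : List Int) (t : Nat) (nge : List Nat) : Prop :=
  nge.length = arr.length ∧
  ∀ m, m < arr.length →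
    nge.getD m 0 = if pvF arr m < t then pvF arr m else arr.length

lemma ngeLoop_inv (arr : List Int) :
    ∀ (m t : Nat) (nge : List Nat), t + m = arr.length → pvNgeOk arr t nge →
      pvNgeOk arr arr.length (pvNgeLoop arr (List.range' t m) (pvStk arr t) nge) := by
  intro m
  induction m with
  | zero =>
    intro t nge hsum h
    have : t = arr.length := by omega
    subst this
    simpa [pvNgeLoop] using h
  | succ m ih =>
    intro t nge hsum h
    have ht : t < arr.length := by omega
    rw [List.range'_succ]
    simp only [pvNgeLoop]
    have hstep := popB_step arr t ht (pvStk arr t) nge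
      (fun i hi => (pvStk_mem arr t i).mp hi)
      (pvStk_sorted arr t)
      (fun i hi => by
        rw [h.1]
        have := ((pvStk_mem arr t i).mp hi).1
        omega)
    have hstk : t :: (pvPopB arr t (pvStk arr t) nge).1 = pvStk arr (t + 1) := by
      rw [hstep.1, pvStk_succ arr t ht]
    have hok : pvNgeOk arr (t + 1) (pvPopB arr t (pvStk arr t) nge).2 := by
      constructor
      · rw [hstep.2.1, h.1]
      · intro m2 hm2
        rw [hstep.2.2 m2]
        by_cases hc : m2 ∈ pvStk arr t ∧ pvF arr m2 = t
        · rw [if_pos hc]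
          simp [hc.2]
        · rw [if_neg hc, h.2 m2 hm2]
          by_cases h1 : pvF arr m2 < t
          · rw [if_pos h1, if_pos (by omega : pvF arr m2 < t + 1)]
          · by_cases h2 : pvF arr m2 < t + 1
            · exfalso
              have he : pvF arr m2 = t := by omega
              refine hc ⟨(pvStk_mem arr t m2).mpr ⟨?_, by omega⟩, he⟩
              have := pvF_gt arr m2 hm2
              omega
            · rw [if_neg h1, if_neg h2]
    rw [hstk]
    exact ih (t + 1) _ (by omega) hok

lemma finalNge (arr : List Int) (i : Nat) (h : i < arr.length) :
    (pvNgeLoop arr (List.range arr.length) [] (List.replicate arr.length arr.length)).getD i 0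
      = pvF arr i := by
  have h0 : pvNgeOk arr 0 (List.replicate arr.length arr.length) :=
    ⟨by simp, fun m hm => by rw [List.getD_replicate _ hm]; simp⟩
  have hres := ngeLoop_inv arr arr.length 0 _ (by omega) h0
  rw [List.range_eq_range', ← pvStk_zero arr]
  rw [hres.2 i h]
  have := pvF_le arr i
  by_cases hlt : pvF arr i < arr.length
  · rw [if_pos hlt]
  · rw [if_neg hlt]
    omega

-- ---- B side: phase 2 ----

lemma pvSuf_len (arr : List Int) : (pvSuf arr).length = arr.length := by
  induction arr with
  | nil => rfl
  | cons v rest ih =>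
    rw [pvSuf]
    cases hs : pvSuf rest with
    | nil =>
      rw [hs] at ih
      simp only [List.length_cons, List.length_nil] at ih ⊢
      omega
    | cons m ms =>
      rw [hs] at ih
      simp only [List.length_cons] at ih ⊢
      omega

lemma pvSuf_le_iff (arr : List Int) :
    ∀ (k : Nat) (x : Int), k < arr.length →
      ((pvSuf arr).getD k 0 ≤ x ↔ ∃ m, k ≤ m ∧ m < arr.length ∧ arr.getD m 0 ≤ x) := by
  induction arr with
  | nil => intro k x hk; simp at hk
  | cons v rest ih =>
    intro k x hk
    rw [pvSuf]
    cases hs : pvSuf rest with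
    | nil =>
      have hr : rest = [] := by
        have := pvSuf_len rest
        rw [hs] at this
        exact List.eq_nil_of_length_eq_zero this.symm
      subst hr
      simp at hk
      subst hk
      constructor
      · intro hv
        exact ⟨0, Nat.le_refl 0, by simp, by simpa using hv⟩
      · rintro ⟨m, _, hm, hx⟩
        simp at hm
        subst hm
        simpa using hx
    | cons mh ms =>
      have hrl : 0 < rest.length := by
        have := pvSuf_len rest
        rw [hs] at this
        simp at this
        omega
      cases k with
      | zero =>
        rw [List.getD_cons_zero]
        constructor
        · intro hle
          rcases min_le_iff.mp hle with hv | hm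
          · exact ⟨0, Nat.le_refl 0, by simpa using hk, by simpa using hv⟩
          · have hm' : (pvSuf rest).getD 0 0 ≤ x := by rw [hs]; simpa using hm
            obtain ⟨m, _, hm2, hm3⟩ := (ih 0 x hrl).mp hm'
            exact ⟨m + 1, by omega, by simpa using hm2, by simpa using hm3⟩
        · rintro ⟨m, _, hm2, hm3⟩
          cases m with
          | zero =>
            simp at hm3
            exact le_trans (min_le_left _ _) hm3
          | succ m' =>
            have : (pvSuf rest).getD 0 0 ≤ x := by
              refine (ih 0 x hrl).mpr ⟨m', by omega, by simp at hm2; omega, by simpa using hm3⟩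
            rw [hs] at this
            simp at this
            exact le_trans (min_le_right _ _) this
      | succ k' =>
        have hk' : k' < rest.length := by simp at hk; omega
        rw [List.getD_cons_succ, ← hs]
        rw [ih k' x hk']
        constructor
        · rintro ⟨m, hm1, hm2, hm3⟩
          exact ⟨m + 1, by omega, by simp; omega, by simpa using hm3⟩
        · rintro ⟨m, hm1, hm2, hm3⟩
          cases m with
          | zero => omega
          | succ m' =>
            exact ⟨m', by omega, by simp at hm2; omega, by simpa using hm3⟩

-- ---- B side: phase 3 ----

lemma pvCheck_01 (arr suf : List Int) (nge : List Nat) (L : List Nat) :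
    pvCheck arr suf nge L = 0 ∨ pvCheck arr suf nge L = 1 := by
  induction L with
  | nil => right; rfl
  | cons i is ih =>
    rw [pvCheck]
    split
    · left; rfl
    · exact ih

lemma pvCheck_eq_one (arr suf : List Int) (nge : List Nat) (L : List Nat) :
    pvCheck arr suf nge L = 1 ↔
      ∀ i ∈ L, ¬(nge.getD i 0 + 1 < arr.length ∧
        suf.getD (nge.getD i 0 + 1) 0 ≤ arr.getD i 0) := by
  induction L with
  | nil => simp [pvCheck]
  | cons i is ih =>
    rw [pvCheck]
    split
    · rename_i hcond
      simp only [Bool.and_eq_true, decide_eq_true_eq] at hcond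
      constructor
      · intro h; omega
      · intro h
        exact absurd hcond (h i List.mem_cons_self)
    · rename_i hcond
      have hni : ¬(nge.getD i 0 + 1 < arr.length ∧
          suf.getD (nge.getD i 0 + 1) 0 ≤ arr.getD i 0) := by
        rintro ⟨h1, h2⟩
        exact hcond (by rw [decide_eq_true h1, decide_eq_true h2]; rfl)
      rw [ih]
      constructor
      · intro h m hm
        rcases List.mem_cons.mp hm with rfl | hm'
        · exact hni
        · exact h m hm'
      · intro h m hm
        exact h m (List.mem_cons_of_mem _ hm)

lemma alt_eq_one (arr : List Int) (N : Int) :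
    isRepresentingBST_alt arr N = 1 ↔ pvOk arr := by
  simp only [isRepresentingBST_alt]
  rw [pvCheck_eq_one]
  constructor
  · intro h i k hfk hk
    have hin : i < arr.length := by
      by_contra hni
      rw [pvF_big arr i (by omega)] at hfk
      omega
    have hi := h i (List.mem_range.mpr hin)
    rw [finalNge arr i hin] at hi
    by_contra hc
    apply hi
    refine ⟨by omega, ?_⟩
    exact (pvSuf_le_iff arr (pvF arr i + 1) (arr.getD i 0) (by omega)).mpr
      ⟨k, by omega, hk, not_lt.mp hc⟩
  · intro hok i hi
    rw [finalNge arr i (List.mem_range.mp hi)]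
    rintro ⟨h1, h2⟩
    obtain ⟨m, hm1, hm2, hm3⟩ := (pvSuf_le_iff arr _ _ h1).mp h2
    exact absurd (hok i m (by omega) hm2) (not_lt.mpr hm3)

lemma alt_01 (arr : List Int) (N : Int) :
    isRepresentingBST_alt arr N = 0 ∨ isRepresentingBST_alt arr N = 1 := by
  simp only [isRepresentingBST_alt]
  exact pvCheck_01 _ _ _ _

-- ---- A side: machine invariant ----

def pvPopped (arr : List Int) (t : Nat) : List Nat :=
  (List.range t).filter (fun i => decide (pvF arr i < t))

def pvPrevA (arr : List Int) (t : Nat) : Option Int :=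
  ((pvPopped arr t).map (fun i => arr.getD i 0)).max?

def pvAlive (arr : List Int) (t : Nat) : Prop :=
  ∀ k i, k < t → pvF arr i < k → arr.getD i 0 < arr.getD k 0

lemma pvPopped_mem (arr : List Int) (t i : Nat) :
    i ∈ pvPopped arr t ↔ i < t ∧ pvF arr i < t := by
  simp [pvPopped, List.mem_filter, List.mem_range]

lemma prevLe_iff (arr : List Int) (t : Nat) (v : Int) :
    pvPrevLe v (pvPrevA arr t) = true ↔ ∃ i ∈ pvPopped arr t, v ≤ arr.getD i 0 := by
  rw [pvPrevA]
  cases hmax : ((pvPopped arr t).map (fun i => arr.getD i 0)).max? with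
  | none =>
    rw [List.max?_eq_none_iff] at hmax
    have hemp : pvPopped arr t = [] := by simpa using hmax
    simp [pvPrevLe, hemp]
  | some M =>
    rw [List.max?_eq_some_iff] at hmax
    simp only [pvPrevLe, decide_eq_true_eq]
    constructor
    · intro hv
      obtain ⟨i, hi, hMi⟩ := List.mem_map.mp hmax.1
      exact ⟨i, hi, hMi ▸ hv⟩
    · rintro ⟨i, hi, hv⟩
      exact le_trans hv (hmax.2 _ (List.mem_map.mpr ⟨i, hi, rfl⟩))

lemma popA_step (arr : List Int) (t : Nat) (ht : t < arr.length) :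
    ∀ (l : List Nat) (prev : Option Int),
      (∀ i ∈ l, i < t ∧ t ≤ pvF arr i) → List.Pairwise (· > ·) l →
      pvPopA (l.map (fun i => arr.getD i 0)) prev (arr.getD t 0) =
        ((l.filter (fun i => decide (t + 1 ≤ pvF arr i))).map (fun i => arr.getD i 0),
         match (l.filter (fun i => decide (pvF arr i = t))).getLast? with
         | none => prev
         | some i => some (arr.getD i 0)) := by
  intro l
  induction l with
  | nil => intro prev _ _; simp [pvPopA]
  | cons i rest ih =>
    intro prev hmem hpw
    have hi := hmem i (List.mem_cons_self)
    rw [List.pairwise_cons] at hpw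
    by_cases hv : arr.getD i 0 < arr.getD t 0
    · have hfi : pvF arr i = t := (pvPop_val_iff arr t i ht hi.1 hi.2).mp hv
      have hrec := ih (some (arr.getD i 0))
        (fun m hm => hmem m (List.mem_cons_of_mem _ hm)) hpw.2
      simp only [List.map_cons, pvPopA, if_pos hv]
      rw [hrec]
      have hd1 : decide (t + 1 ≤ pvF arr i) = false := by simp [hfi]
      have hd2 : decide (pvF arr i = t) = true := by simp [hfi]
      rw [List.filter_cons, List.filter_cons, hd1, hd2]
      simp only [Bool.false_eq_true, if_false, if_true, List.getLast?_cons]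
      cases hL : (List.filter (fun i => decide (pvF arr i = t)) rest).getLast? with
      | none => simp
      | some m => simp
    · have key : ∀ m ∈ i :: rest, t + 1 ≤ pvF arr m := by
        intro m hm
        rcases List.mem_cons.mp hm with rfl | hm'
        · rcases Nat.eq_or_lt_of_le hi.2 with he | hlt
          · exact absurd ((pvPop_val_iff arr t m ht hi.1 hi.2).mpr he.symm) hv
          · exact hlt
        · have hmp := hmem m (List.mem_cons_of_mem _ hm')
          have him : m < i := hpw.1 m hm'
          have h1 : arr.getD i 0 ≤ arr.getD m 0 :=
            pvF_before arr m i him (by omega)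
          have h2 : ¬ arr.getD m 0 < arr.getD t 0 := by
            intro hc
            exact hv (lt_of_le_of_lt h1 hc)
          rcases Nat.eq_or_lt_of_le hmp.2 with he | hlt
          · exact absurd ((pvPop_val_iff arr t m ht hmp.1 hmp.2).mpr he.symm) h2
          · exact hlt
      have hfe : List.filter (fun i => decide (pvF arr i = t)) (i :: rest) = [] := by
        rw [List.filter_eq_nil_iff]
        intro m hm
        have := key m hm
        simp
        omega
      have hke : List.filter (fun i => decide (t + 1 ≤ pvF arr i)) (i :: rest) = i :: rest :=
        List.filter_eq_self.mpr (fun m hm => by simp [key m hm])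
      simp only [List.map_cons, pvPopA, if_neg hv]
      rw [hfe, hke]
      simp

lemma pvPairwise_getLast {α : Type} (R : α → α → Prop) :
    ∀ (l : List α), List.Pairwise R l → ∀ (b : α), l.getLast? = some b →
      ∀ a ∈ l, a = b ∨ R a b := by
  intro l
  induction l with
  | nil => intro _ b hb; simp at hb
  | cons x xs ih =>
    intro hpw b hb a ha
    rw [List.pairwise_cons] at hpw
    cases hxs : xs.getLast? with
    | none =>
      rw [List.getLast?_eq_none_iff] at hxs
      subst hxs
      simp [List.getLast?_cons] at hb
      simp at ha
      left
      rw [ha, hb]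
    | some y =>
      rw [List.getLast?_cons, hxs] at hb
      simp at hb
      subst hb
      rcases List.mem_cons.mp ha with rfl | ha'
      · right
        exact hpw.1 _ (List.mem_of_getLast? hxs)
      · exact ih hpw.2 y hxs a ha'

lemma prevA_succ (arr : List Int) (t : Nat) (ht : t < arr.length) (hal : pvAlive arr t) :
    pvPrevA arr (t + 1) =
      match ((pvStk arr t).filter (fun i => decide (pvF arr i = t))).getLast? with
      | none => pvPrevA arr t
      | some i => some (arr.getD i 0) := by
  cases hL : ((pvStk arr t).filter (fun i => decide (pvF arr i = t))).getLast? with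
  | none =>
    rw [List.getLast?_eq_none_iff, List.filter_eq_nil_iff] at hL
    have hpop : pvPopped arr (t + 1) = pvPopped arr t := by
      rw [pvPopped, pvPopped, List.range_succ, List.filter_append]
      have hft : List.filter (fun i => decide (pvF arr i < t + 1)) [t] = [] := by
        have := pvF_gt arr t ht
        simp
        omega
      rw [hft, List.append_nil]
      apply List.filter_congr
      intro i hi
      have hit : i < t := List.mem_range.mp hi
      by_cases hc : pvF arr i < t
      · simp [hc]; omega
      · have hne : pvF arr i ≠ t := by
          intro he
          exact hL i ((pvStk_mem arr t i).mpr ⟨hit, by omega⟩) (by simp [he])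
        simp
        omega
    rw [pvPrevA, pvPrevA, hpop]
  | some iB =>
    have hiB := List.mem_filter.mp (List.mem_of_getLast? hL)
    have hiBs := (pvStk_mem arr t iB).mp hiB.1
    have hfiB : pvF arr iB = t := by simpa using hiB.2
    have hpwF : List.Pairwise (· > ·)
        ((pvStk arr t).filter (fun i => decide (pvF arr i = t))) :=
      List.Pairwise.filter _ (pvStk_sorted arr t)
    have hlast : ∀ m ∈ (pvStk arr t).filter (fun i => decide (pvF arr i = t)),
        m = iB ∨ m > iB := pvPairwise_getLast _ _ hpwF iB hL
    rw [pvPrevA]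
    rw [List.max?_eq_some_iff]
    constructor
    · exact List.mem_map.mpr ⟨iB, (pvPopped_mem arr (t + 1) iB).mpr ⟨by omega, by omega⟩, rfl⟩
    · intro b hb
      obtain ⟨i0, hi0, rfl⟩ := List.mem_map.mp hb
      have hi0p := (pvPopped_mem arr (t + 1) i0).mp hi0
      have hi0t : i0 < t := by
        rcases Nat.lt_or_ge i0 t with h | h
        · exact h
        · exfalso
          have : i0 = t := by omega
          subst this
          have := pvF_gt arr i0 ht
          omega
      by_cases hcase : pvF arr i0 = t
      · have hi0F : i0 ∈ (pvStk arr t).filter (fun i => decide (pvF arr i = t)) :=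
          List.mem_filter.mpr ⟨(pvStk_mem arr t i0).mpr ⟨hi0t, by omega⟩, by simp [hcase]⟩
        rcases hlast i0 hi0F with rfl | hgt
        · exact le_refl _
        · exact pvF_before arr iB i0 hgt (by omega)
      · have hfi0 : pvF arr i0 < t := by omega
        rcases Nat.lt_trichotomy i0 iB with hlt | rfl | hgt
        · rcases Nat.lt_trichotomy (pvF arr i0) iB with h1 | h2 | h3
          · exact le_of_lt (hal iB i0 (by omega) h1)
          · have := pvF_hit arr i0 (by omega)
            rw [h2] at this
            exact le_of_lt this
          · have hg1 : arr.getD (pvF arr i0) 0 ≤ arr.getD iB 0 :=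
              pvF_before arr iB (pvF arr i0) h3 (by omega)
            have hg2 := pvF_hit arr i0 (by omega)
            exact le_of_lt (lt_of_lt_of_le hg2 hg1)
        · omega
        · exact pvF_before arr iB i0 hgt (by omega)

lemma goA_01 (w S : List Int) (p : Option Int) : pvGoA w S p = 0 ∨ pvGoA w S p = 1 := by
  induction w generalizing S p with
  | nil => right; rfl
  | cons v vs ih =>
    rw [pvGoA]
    split
    · left; rfl
    · exact ih _ _

lemma goA_inv (arr : List Int) :
    ∀ (m t : Nat), t + m = arr.length → pvAlive arr t →
      (pvGoA (arr.drop t) ((pvStk arr t).map (fun i => arr.getD i 0)) (pvPrevA arr t) = 1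
        ↔ pvOk arr) := by
  intro m
  induction m with
  | zero =>
    intro t hsum hal
    have : t = arr.length := by omega
    subst this
    rw [List.drop_length]
    exact iff_of_true rfl (fun i k hfk hk => hal k i hk hfk)
  | succ m ih =>
    intro t hsum hal
    have ht : t < arr.length := by omega
    rw [List.drop_eq_getElem_cons ht, pvGoA]
    have hgd : arr[t] = arr.getD t 0 := (List.getD_eq_getElem arr 0 ht).symm
    rw [hgd]
    by_cases hpl : pvPrevLe (arr.getD t 0) (pvPrevA arr t) = true
    · rw [if_pos hpl]
      refine iff_of_false (by simp) ?_
      obtain ⟨i, hip, hle⟩ := (prevLe_iff arr t _).mp hpl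
      have hipp := (pvPopped_mem arr t i).mp hip
      intro hok
      exact absurd (hok i t hipp.2 ht) (not_lt.mpr hle)
    · rw [if_neg hpl]
      have hpop := popA_step arr t ht (pvStk arr t) (pvPrevA arr t)
        (fun i hi => (pvStk_mem arr t i).mp hi) (pvStk_sorted arr t)
      have hstep : ∀ i, pvF arr i < t → arr.getD i 0 < arr.getD t 0 := by
        intro i hfi
        by_contra hc
        apply hpl
        refine (prevLe_iff arr t _).mpr ⟨i, (pvPopped_mem arr t i).mpr ⟨?_, hfi⟩, not_lt.mp hc⟩
        have hin : i < arr.length := by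
          by_contra hni
          rw [pvF_big arr i (by omega)] at hfi
          omega
        have := pvF_gt arr i hin
        omega
      have hal' : pvAlive arr (t + 1) := by
        intro k i hk hfk
        rcases Nat.lt_or_ge k t with h | h
        · exact hal k i h hfk
        · have : k = t := by omega
          subst this
          exact hstep i hfk
      have ih' := ih (t + 1) (by omega) hal'
      rw [pvStk_succ arr t ht, List.map_cons, prevA_succ arr t ht hal] at ih'
      rw [hpop]
      exact ih'

lemma a_eq_one (arr : List Int) (N : Int) : isRepresentingBST arr N = 1 ↔ pvOk arr := by
  have h0 : pvPrevA arr 0 = none := by simp [pvPrevA, pvPopped]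
  have := goA_inv arr arr.length 0 (by omega) (fun k i hk => absurd hk (Nat.not_lt_zero k))
  rw [pvStk_zero, List.map_nil, h0, List.drop_zero] at this
  exact this

-- ===== VERDICT (by name: the statement is the Claim_ definition above) =====
theorem isRepresentingBST_spec : Claim_equal_isRepresentingBST := by
  intro arr N _
  unfold Spec_isRepresentingBST
  by_cases h : pvOk arr
  · rw [(a_eq_one arr N).mpr h, ((alt_eq_one arr N).mpr h).symm]
  · have ha := a_eq_one arr N
    have hb := alt_eq_one arr N
    rcases goA_01 arr [] none with h0 | h1
    · rcases alt_01 arr N with b0 | b1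
      · show pvGoA arr [] none = _; rw [h0, b0]
      · exact absurd (hb.mp b1) h
    · exact absurd (ha.mp h1) h
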